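-- pv_equiv track=rewrite | github.com/thebasicscompany/main | harness/reference/python-original/helpers.py | _has_return_statement
-- ===== SOURCE A (Python) =====
-- def _has_return_statement(expression):
--     i = 0
--     n = len(expression)
--     state = "code"
--     quote = ""
--     while i < n:
--         ch = expression[i]
--         nxt = expression[i + 1] if i + 1 < n else ""
--         if state == "code":
--             if ch in ("'", '"', "`"):
--                 state = "string"; quote = ch; i += 1; continue
--             if ch == "/" and nxt == "/":
--                 state = "line_comment"; i += 2; continue
--             if ch == "/" and nxt == "*":
--                 state = "block_comment"; i += 2; continue
--             if expression.startswith("return", i):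
--                 before = expression[i - 1] if i > 0 else ""
--                 after = expression[i + 6] if i + 6 < n else ""
--                 if not (before == "_" or before.isalnum()) and not (after == "_" or after.isalnum()):
--                     return True
--             i += 1; continue
--         if state == "line_comment":
--             if ch == "\n":
--                 state = "code"
--             i += 1; continue
--         if state == "block_comment":
--             if ch == "*" and nxt == "/":
--                 state = "code"; i += 2; continue
--             i += 1; continue
--         if state == "string":
--             if ch == "\\":
--                 i += 2; continue
--             if ch == quote:
--                 state = "code"; quote = ""
--             i += 1; continue
--     return False
-- ===== SOURCE B (Python) =====
-- def _has_return_statement(expression):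
--     # Pass 1: mask out string/comment characters (length-preserving).
--     n = len(expression)
--     mask = [" "] * n
--     state = "code"
--     quote = ""
--     i = 0
--     while i < n:
--         ch = expression[i]
--         nxt = expression[i + 1] if i + 1 < n else ""
--         if state == "code":
--             if ch in ("'", '"', "`"):
--                 state = "string"; quote = ch; i += 1
--             elif ch == "/" and nxt == "/":
--                 state = "line_comment"; i += 2
--             elif ch == "/" and nxt == "*":
--                 state = "block_comment"; i += 2
--             else:
--                 mask[i] = ch; i += 1
--         elif state == "line_comment":
--             if ch == "\n":
--                 state = "code"
--             i += 1
--         elif state == "block_comment":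
--             if ch == "*" and nxt == "/":
--                 state = "code"; i += 2
--             else:
--                 i += 1
--         else:  # string
--             if ch == "\\":
--                 i += 2
--             else:
--                 if ch == quote:
--                     state = "code"; quote = ""
--                 i += 1
--     m = "".join(mask)
--     # Pass 2: whole-word search for 'return' in the masked code.
--     j = m.find("return")
--     while j != -1:
--         before = expression[j - 1] if j > 0 else ""
--         after = expression[j + 6] if j + 6 < n else ""
--         if not (before == "_" or before.isalnum()) and not (after == "_" or after.isalnum()):
--             return True
--         j = m.find("return", j + 1)
--     return False
-- ===== Notes on version B (the rewrite author's own statement) =====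
-- stated objective: alternative
-- what changed: A interleaves the string/comment state machine with the keyword test in one loop; B first masks non-code characters to spaces in a length-preserving pass, then separately searches the masked text for whole-word keyword occurrences with str.find.
import Mathlib
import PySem

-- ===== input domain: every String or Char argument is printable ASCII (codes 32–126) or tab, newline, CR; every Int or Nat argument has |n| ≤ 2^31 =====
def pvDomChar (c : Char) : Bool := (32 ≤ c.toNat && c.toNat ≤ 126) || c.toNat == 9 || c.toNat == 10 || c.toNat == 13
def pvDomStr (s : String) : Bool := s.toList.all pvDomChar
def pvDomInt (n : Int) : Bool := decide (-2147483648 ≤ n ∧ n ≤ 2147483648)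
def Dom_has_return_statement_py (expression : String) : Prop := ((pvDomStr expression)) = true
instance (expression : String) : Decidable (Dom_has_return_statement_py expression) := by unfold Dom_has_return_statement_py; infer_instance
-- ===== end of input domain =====

-- B replaces A's single fused loop by a masking pass plus a separate whole-word search; same cost, clearer separation of concerns.

-- state of the tokenizer ("code" / "line_comment" / "block_comment" / "string" with its quote)
inductive PvSt where
  | code
  | lineC
  | blockC
  | strS (q : Char)
deriving DecidableEq, Repr

-- Python:  before == "_" or before.isalnum()  (empty string → False, carried as none)
def pvBoundary (c : Option Char) : Bool :=
  match c with
  | none => false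
  | some c => c == '_' || PySem.Chars.isalnum c

def pvRet : List Char := ['r', 'e', 't', 'u', 'r', 'n']

-- ===== PORT A =====
-- A's while loop, step for step; `prev` is expression[i-1] (none at i = 0),
-- the suffix `l` is expression[i:], lookahead nxt = l.tail.head?.
def pvRunA (prev : Option Char) (l : List Char) (st : PvSt) : Bool :=
  match l, st with
  | [], _ => false
  | ch :: rest, PvSt.code =>
    if ch = '\'' ∨ ch = '"' ∨ ch = '`' then pvRunA (some ch) rest (PvSt.strS ch)
    else if ch = '/' ∧ rest.head? = some '/' then pvRunA rest.head? rest.tail PvSt.lineC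
    else if ch = '/' ∧ rest.head? = some '*' then pvRunA rest.head? rest.tail PvSt.blockC
    else if pvRet.isPrefixOf (ch :: rest) ∧ pvBoundary prev = false
              ∧ pvBoundary ((ch :: rest).drop 6).head? = false then true
    else pvRunA (some ch) rest PvSt.code
  | ch :: rest, PvSt.lineC =>
    if ch = '\n' then pvRunA (some ch) rest PvSt.code
    else pvRunA (some ch) rest PvSt.lineC
  | ch :: rest, PvSt.blockC =>
    if ch = '*' ∧ rest.head? = some '/' then pvRunA rest.head? rest.tail PvSt.code
    else pvRunA (some ch) rest PvSt.blockC
  | ch :: rest, PvSt.strS q =>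
    if ch = '\\' then pvRunA rest.head? rest.tail (PvSt.strS q)
    else if ch = q then pvRunA (some ch) rest PvSt.code
    else pvRunA (some ch) rest (PvSt.strS q)
termination_by l.length
decreasing_by all_goals simp [List.length_tail] <;> omega

def has_return_statement_py (expression : String) : Bool :=
  pvRunA none expression.toList PvSt.code

-- ===== PORT B =====
-- pass 1 of Source B: length-preserving mask (non-code characters become ' ')
def pvMask (l : List Char) (st : PvSt) : List Char :=
  match l, st with
  | [], _ => []
  | ch :: rest, PvSt.code =>
    if ch = '\'' ∨ ch = '"' ∨ ch = '`' then ' ' :: pvMask rest (PvSt.strS ch)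
    else if ch = '/' ∧ rest.head? = some '/' then ' ' :: ' ' :: pvMask rest.tail PvSt.lineC
    else if ch = '/' ∧ rest.head? = some '*' then ' ' :: ' ' :: pvMask rest.tail PvSt.blockC
    else ch :: pvMask rest PvSt.code
  | ch :: rest, PvSt.lineC =>
    if ch = '\n' then ' ' :: pvMask rest PvSt.code
    else ' ' :: pvMask rest PvSt.lineC
  | ch :: rest, PvSt.blockC =>
    if ch = '*' ∧ rest.head? = some '/' then ' ' :: ' ' :: pvMask rest.tail PvSt.code
    else ' ' :: pvMask rest PvSt.blockC
  | ch :: rest, PvSt.strS q =>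
    if ch = '\\' then ' ' :: (match rest with | [] => [] | _ :: r => ' ' :: pvMask r (PvSt.strS q))
    else if ch = q then ' ' :: pvMask rest PvSt.code
    else ' ' :: pvMask rest (PvSt.strS q)
termination_by l.length
decreasing_by all_goals simp [List.length_tail] <;> omega

-- pass 2 of Source B: m.find("return", j) loop — scan the mask for 'return',
-- check word boundaries against the original string (prev = expression[j-1])
def pvScan (prev : Option Char) (mask : List Char) (expr : List Char) : Bool :=
  match mask, expr with
  | mc :: mrest, ec :: erest =>
    if pvRet.isPrefixOf (mc :: mrest) ∧ pvBoundary prev = false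
        ∧ pvBoundary ((ec :: erest).drop 6).head? = false then true
    else pvScan (some ec) mrest erest
  | _, _ => false

def has_return_statement_py_alt (expression : String) : Bool :=
  pvScan none (pvMask expression.toList PvSt.code) expression.toList

-- ===== PRECONDITION & SPEC =====
def Spec_has_return_statement_py (expression : String) (out : Bool) : Prop := out = has_return_statement_py_alt expression
instance (expression : String) (out : Bool) : Decidable (Spec_has_return_statement_py expression out) := by unfold Spec_has_return_statement_py; infer_instance

-- ===== CLAIM (what is proved, stated in full; the proofs are below) =====
def Claim_equal_has_return_statement_py : Prop := ∀ (expression : String), Dom_has_return_statement_py expression → Spec_has_return_statement_py expression (has_return_statement_py expression)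

-- ===== LEMMAS AND PROOFS =====

-- characters of "return" are never swallowed by the mask
def pvWord (c : Char) : Prop := c ≠ ' ' ∧ c ≠ '\'' ∧ c ≠ '"' ∧ c ≠ '`' ∧ c ≠ '/'

lemma pvRet_word : ∀ c ∈ pvRet, pvWord c := by
  intro c hc; unfold pvWord; fin_cases hc <;> simp

-- a word-character prefix survives the masking pass unchanged, and nothing masked can fake it
lemma prefix_mask (l : List Char) : ∀ (p : List Char), (∀ c ∈ p, pvWord c) →
    (p.isPrefixOf (pvMask l PvSt.code) = p.isPrefixOf l) := by
  induction l with
  | nil => intro p hp; simp [pvMask]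
  | cons ch rest ih =>
    intro p hp
    cases p with
    | nil => simp [List.isPrefixOf]
    | cons c p' =>
      obtain ⟨hcsp, hq1, hq2, hq3, hsl⟩ := hp c (List.mem_cons_self ..)
      by_cases h1 : ch = '\'' ∨ ch = '"' ∨ ch = '`'
      · have hne : c ≠ ch := by rcases h1 with h | h | h <;> subst h <;> assumption
        simp [pvMask, h1, List.isPrefixOf,
          beq_eq_false_iff_ne.mpr hcsp, beq_eq_false_iff_ne.mpr hne]
      · by_cases h2 : ch = '/' ∧ rest.head? = some '/'
        · have hne : c ≠ ch := h2.1 ▸ hsl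
          simp [pvMask, h1, h2, List.isPrefixOf,
            beq_eq_false_iff_ne.mpr hcsp, beq_eq_false_iff_ne.mpr hne]
          exact fun hc => absurd (hc.trans h2.1.symm) hne
        · by_cases h3 : ch = '/' ∧ rest.head? = some '*'
          · have hne : c ≠ ch := h3.1 ▸ hsl
            simp [pvMask, h1, h2, h3, List.isPrefixOf,
              beq_eq_false_iff_ne.mpr hcsp, beq_eq_false_iff_ne.mpr hne]
            exact fun hc => absurd (hc.trans h3.1.symm) hne
          · have : pvMask (ch :: rest) PvSt.code = ch :: pvMask rest PvSt.code := by
              simp [pvMask, h1, h2, h3]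
            rw [this]
            simp only [List.isPrefixOf]
            rw [ih p' (fun c hc => hp c (List.mem_cons_of_mem _ hc))]

-- scanning the mask at a masked (space) position just advances
lemma pvScan_space (prev : Option Char) (ms es : List Char) (ec : Char) :
    pvScan prev (' ' :: ms) (ec :: es) = pvScan (some ec) ms es := by
  simp [pvScan, pvRet, List.isPrefixOf]

lemma scan_runA : ∀ (n : ℕ) (l : List Char) (st : PvSt) (prev : Option Char), l.length ≤ n →
    pvRunA prev l st = pvScan prev (pvMask l st) l := by
  intro n
  induction n with
  | zero =>
    intro l st prev hl
    have : l = [] := by cases l <;> simp_all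
    subst this; simp [pvRunA, pvMask, pvScan]
  | succ n ih =>
    intro l st prev hl
    cases l with
    | nil => simp [pvRunA, pvMask, pvScan]
    | cons ch rest =>
      have hr : rest.length ≤ n := by simp at hl; omega
      cases st with
      | code =>
        by_cases h1 : ch = '\'' ∨ ch = '"' ∨ ch = '`'
        · rw [pvRunA, pvMask]; simp only [h1, if_true, if_pos h1, pvScan_space]
          exact ih rest _ _ hr
        · by_cases h2 : ch = '/' ∧ rest.head? = some '/'
          · obtain ⟨hch, hh⟩ := h2
            cases rest with
            | nil => simp at hh
            | cons c2 r2 =>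
              simp at hh; subst hh; subst hch
              rw [pvRunA, pvMask]
              simp only [if_neg h1, if_pos (⟨rfl, rfl⟩ : ('/':Char) = '/' ∧ (('/':Char) :: r2).head? = some '/'), pvScan_space]
              exact ih r2 _ _ (by simp at hr; omega)
          · by_cases h3 : ch = '/' ∧ rest.head? = some '*'
            · obtain ⟨hch, hh⟩ := h3
              cases rest with
              | nil => simp at hh
              | cons c2 r2 =>
                simp at hh; subst hh; subst hch
                rw [pvRunA, pvMask]
                simp only [if_neg h1, if_neg h2, if_pos (⟨rfl, rfl⟩ : ('/':Char) = '/' ∧ (('*':Char) :: r2).head? = some '*'), pvScan_space]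
                exact ih r2 _ _ (by simp at hr; omega)
            · have hm : pvMask (ch :: rest) PvSt.code = ch :: pvMask rest PvSt.code := by
                simp [pvMask, h1, h2, h3]
              have hpre : pvRet.isPrefixOf (ch :: pvMask rest PvSt.code)
                  = pvRet.isPrefixOf (ch :: rest) := by
                rw [← hm]; exact prefix_mask _ _ pvRet_word
              rw [pvRunA, hm, pvScan]
              simp only [if_neg h1, if_neg h2, if_neg h3, hpre]
              split_ifs with h4
              · rfl
              · exact ih rest _ _ hr
      | lineC =>
        by_cases h : ch = '\n'
        · rw [pvRunA, pvMask]; simp only [h, if_true, if_pos rfl, pvScan_space]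
          exact ih rest _ _ hr
        · rw [pvRunA, pvMask]; simp only [if_neg h, pvScan_space]
          exact ih rest _ _ hr
      | blockC =>
        by_cases h : ch = '*' ∧ rest.head? = some '/'
        · obtain ⟨hch, hh⟩ := h
          cases rest with
          | nil => simp at hh
          | cons c2 r2 =>
            simp at hh; subst hh; subst hch
            rw [pvRunA, pvMask]
            simp only [if_pos (⟨rfl, rfl⟩ : ('*':Char) = '*' ∧ (('/':Char) :: r2).head? = some '/'), pvScan_space]
            exact ih r2 _ _ (by simp at hr; omega)
        · rw [pvRunA, pvMask]; simp only [if_neg h, pvScan_space]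
          exact ih rest _ _ hr
      | strS q =>
        by_cases h : ch = '\\'
        · cases rest with
          | nil =>
            subst h
            rw [pvRunA, pvMask.eq_def]
            simp only [if_pos rfl, pvScan_space]
            simp [pvRunA, pvScan]
            exact fun hpre _ => absurd hpre (by decide)
          | cons c2 r2 =>
            subst h
            rw [pvRunA, pvMask.eq_def]
            simp only [if_pos rfl, pvScan_space]
            exact ih r2 _ _ (by simp at hr; omega)
        · by_cases hq : ch = q
          · rw [pvRunA, pvMask.eq_def]
            simp only [if_neg h, if_pos hq, pvScan_space]
            exact ih rest _ _ hr
          · rw [pvRunA, pvMask.eq_def]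
            simp only [if_neg h, if_neg hq, pvScan_space]
            exact ih rest _ _ hr

-- ===== VERDICT (by name: the statement is the Claim_ definition above) =====
theorem has_return_statement_py_spec : Claim_equal_has_return_statement_py := by
  intro e _
  unfold Spec_has_return_statement_py has_return_statement_py has_return_statement_py_alt
  exact scan_runA e.toList.length e.toList PvSt.code none le_rfl
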